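-- pv_equiv track=rewrite | github.com/tf302/Chatbot_trglh | lib/cut_sentence.py | cut_sentence_by_word
-- ===== SOURCE A (Python) =====
-- import string
--
-- letters = string.ascii_lowercase + "+"
--
-- def cut_sentence_by_word(sentence):
--     """
--     实现中英文分词
--     :param sentence:句子
--     :return:
--     """
--     temp = ""
--     result = []
--     # python 和c++那个难-->[python ,和, c++,那个,难]
--     for word in sentence:
--         if word.lower() in letters:
--             temp += word
--         else:
--             if temp != "":
--                 result.append(temp.lower())
--                 temp = ""
--             result.append(word)
--     if temp != "":
--         result.append(temp.lower())
--     return result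
-- ===== SOURCE B (Python) =====
-- import string
--
-- letters = string.ascii_lowercase + "+"
--
-- def cut_sentence_by_word(sentence):
--     # Staged algorithm: (1) classify every position, (2) compute the list of
--     # token boundary positions (a cut everywhere except between two adjacent
--     # letter characters), (3) slice the sentence between consecutive cuts,
--     # lowercasing the letter segments.
--     n = len(sentence)
--     flags = [c.lower() in letters for c in sentence]
--     cuts = [i for i in range(n + 1)
--             if i == 0 or i == n or not (flags[i - 1] and flags[i])]
--     return [sentence[a:b].lower() if flags[a] else sentence[a:b]
--             for a, b in zip(cuts, cuts[1:])]
-- ===== Notes on version B (the rewrite author's own statement) =====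
-- stated objective: alternative
-- what changed: Replaced A's single-pass accumulator/flush state machine with a staged algorithm: classify every position, compute the list of token boundary positions (a cut everywhere except between two adjacent letter characters), then slice the sentence between consecutive boundaries, lowercasing letter segments.
import Mathlib
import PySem

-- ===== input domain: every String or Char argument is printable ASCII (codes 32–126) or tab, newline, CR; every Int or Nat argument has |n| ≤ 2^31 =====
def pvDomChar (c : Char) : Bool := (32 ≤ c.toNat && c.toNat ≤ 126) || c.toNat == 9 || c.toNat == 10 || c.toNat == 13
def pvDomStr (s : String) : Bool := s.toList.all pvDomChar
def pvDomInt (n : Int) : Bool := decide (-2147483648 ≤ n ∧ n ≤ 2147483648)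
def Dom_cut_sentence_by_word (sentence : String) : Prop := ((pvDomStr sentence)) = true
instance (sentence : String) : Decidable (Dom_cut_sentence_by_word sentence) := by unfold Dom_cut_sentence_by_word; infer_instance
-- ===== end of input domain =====

-- B replaces A's accumulator/flush state machine with a staged algorithm:
-- classify positions, compute the token boundary positions, then slice; same cost.

-- letters = string.ascii_lowercase + "+"
def pvLetters : List Char := "abcdefghijklmnopqrstuvwxyz+".toList

-- word.lower() in letters  (single char; exact on the ASCII domain, where
-- c.lower() is the single char PySem.Chars.lowerChar c and 'in' is membership)
def pvIsLet (c : Char) : Bool := pvLetters.contains (PySem.Chars.lowerChar c)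

-- ===== PORT A =====
-- the for-loop as structural recursion on the characters with the same state:
-- temp (accumulated letter run) and the emitted result (built front-first)
def cutA (temp : List Char) : List Char → List String
  | [] => if temp ≠ [] then [String.ofList (PySem.Chars.lower temp)] else []
  | w :: ws =>
    if pvIsLet w then cutA (temp ++ [w]) ws
    else (if temp ≠ [] then [String.ofList (PySem.Chars.lower temp), String.ofList [w]]
          else [String.ofList [w]]) ++ cutA [] ws

def cut_sentence_by_word (sentence : String) : List String :=
  cutA [] sentence.toList

-- ===== PORT B =====
-- the boundary predicate of Source B: a cut at i iff i==0 or i==n or not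
-- (flags[i-1] and flags[i]); Python's short-circuit guarantees 1 ≤ i < n at the
-- indexings, so getD is exact there (the default is never the decided value)
def pvP (F : List Bool) (i : Nat) : Bool :=
  i == 0 || i == F.length || !(F.getD (i - 1) false && F.getD i false)

-- one token of Source B: sentence[a:b] (0 ≤ a ≤ b ≤ n here, so drop/take is exactly
-- the Python slice), lowercased as a whole when flags[a] holds (a < n here)
def pvTok (cs : List Char) (p : Nat × Nat) : String :=
  if (cs.map pvIsLet).getD p.1 false then
    String.ofList (PySem.Chars.lower ((cs.drop p.1).take (p.2 - p.1)))
  else String.ofList ((cs.drop p.1).take (p.2 - p.1))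

def cut_sentence_by_word_alt (sentence : String) : List String :=
  let cs := sentence.toList
  let cuts := (List.range (cs.length + 1)).filter (pvP (cs.map pvIsLet))
  (cuts.zip cuts.tail).map (pvTok cs)

-- ===== PRECONDITION & SPEC =====
def Spec_cut_sentence_by_word (sentence : String) (out : List String) : Prop := out = cut_sentence_by_word_alt sentence
instance (sentence : String) (out : List String) : Decidable (Spec_cut_sentence_by_word sentence out) := by unfold Spec_cut_sentence_by_word; infer_instance

-- ===== CLAIM (what is proved, stated in full; the proofs are below) =====
def Claim_equal_cut_sentence_by_word : Prop := ∀ (sentence : String), Dom_cut_sentence_by_word sentence → Spec_cut_sentence_by_word sentence (cut_sentence_by_word sentence)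

-- ===== LEMMAS AND PROOFS =====

-- common reference point: maximal runs of characters of the same class …
def pvRuns : List Char → List (Bool × List Char)
  | [] => []
  | c :: cs =>
    match pvRuns cs with
    | (k, g) :: rest => if pvIsLet c = k then (k, c :: g) :: rest
                        else (pvIsLet c, [c]) :: (k, g) :: rest
    | [] => [(pvIsLet c, [c])]

-- … and their tokenisation (letter run → one lowercased token, else per char)
def pvDispatch : List (Bool × List Char) → List String
  | [] => []
  | (k, g) :: rest =>
    (if k then [String.ofList (PySem.Chars.lower g)]
     else g.map (fun c => String.ofList [c])) ++ pvDispatch rest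

-- ---- A-side: cutA = dispatch ∘ runs ----
def pvPrepend (temp : List Char) (rs : List (Bool × List Char)) : List (Bool × List Char) :=
  if temp = [] then rs
  else match rs with
    | (true, g) :: rest => (true, temp ++ g) :: rest
    | _ => (true, temp) :: rs

theorem cutA_eq_dispatch (cs : List Char) : ∀ (temp : List Char),
    cutA temp cs = pvDispatch (pvPrepend temp (pvRuns cs)) := by
  induction cs with
  | nil =>
    intro temp
    by_cases h : temp = [] <;> simp [cutA, pvRuns, pvPrepend, pvDispatch, h]
  | cons c cs ih =>
    intro temp
    by_cases hc : pvIsLet c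
    · have key : pvPrepend temp (pvRuns (c :: cs)) = pvPrepend (temp ++ [c]) (pvRuns cs) := by
        cases hrs : pvRuns cs with
        | nil =>
          by_cases h : temp = [] <;> simp [pvRuns, pvPrepend, hrs, hc, h]
        | cons p rest =>
          obtain ⟨k, g⟩ := p
          cases k with
          | true =>
            by_cases h : temp = [] <;> simp [pvRuns, pvPrepend, hrs, hc, h]
          | false =>
            by_cases h : temp = [] <;> simp [pvRuns, pvPrepend, hrs, hc, h]
      simp [cutA, hc, ih, key]
    · have hruns : pvDispatch (pvRuns (c :: cs)) = String.ofList [c] :: pvDispatch (pvRuns cs) := by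
        cases hrs : pvRuns cs with
        | nil => simp [pvRuns, pvDispatch, hrs, hc]
        | cons p rest =>
          obtain ⟨k, g⟩ := p
          cases k with
          | true => simp [pvRuns, pvDispatch, hrs, hc]
          | false => simp [pvRuns, pvDispatch, hrs, hc]
      have hhead : ∃ g rest, pvRuns (c :: cs) = (false, g) :: rest := by
        cases hrs : pvRuns cs with
        | nil => exact ⟨[c], [], by simp [pvRuns, hrs, hc]⟩
        | cons p rest =>
          obtain ⟨k, g⟩ := p
          cases k with
          | true => exact ⟨[c], (true, g) :: rest, by simp [pvRuns, hrs, hc]⟩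
          | false => exact ⟨c :: g, rest, by simp [pvRuns, hrs, hc]⟩
      obtain ⟨g, rest, hg⟩ := hhead
      rw [hg] at hruns ⊢
      by_cases h : temp = [] <;>
        simp [cutA, hc, ih, pvPrepend, pvDispatch, ← hruns, h]

-- ---- B-side: the filtered range of cuts, described recursively ----
def pvCutTail : List Bool → List Nat
  | [] => []
  | b :: F => (if b && F.headD false then [] else [1]) ++ (pvCutTail F).map (· + 1)

theorem pvCutTail_ne_nil : ∀ (F : List Bool), F ≠ [] → pvCutTail F ≠ []
  | [], h => absurd rfl h
  | [b], _ => by simp [pvCutTail]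
  | b :: d :: F', _ => by
    have ih := pvCutTail_ne_nil (d :: F') (by simp)
    cases hx : pvCutTail (d :: F') with
    | nil => exact absurd hx ih
    | cons t T =>
      rw [pvCutTail, hx]
      by_cases hb : (b && (d :: F').headD false) = true <;> simp

theorem filter_shift (q : Nat → Bool) (n : Nat) :
    (List.range (n + 1)).filter q =
      (if q 0 then [0] else []) ++ ((List.range n).filter (fun i => q (i + 1))).map (· + 1) := by
  rw [List.range_succ_eq_map, List.filter_cons, List.filter_map]
  split_ifs <;> rfl

theorem pvP_zero (F : List Bool) : pvP F 0 = true := by simp [pvP]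

theorem pvP_one (b : Bool) (F : List Bool) :
    pvP (b :: F) 1 = !(b && F.headD false) := by
  cases F with
  | nil => simp [pvP]
  | cons d F' => simp [pvP]

theorem pvP_shift (b : Bool) (F : List Bool) (i : Nat) :
    pvP (b :: F) (i + 1 + 1) = pvP F (i + 1) := by
  simp [pvP]

theorem cuts_eq (F : List Bool) :
    (List.range (F.length + 1)).filter (pvP F) = 0 :: pvCutTail F := by
  induction F with
  | nil => decide
  | cons b F ih =>
    have inner : ((List.range F.length).filter (fun i => pvP F (i + 1))).map (· + 1) =
        pvCutTail F := by
      have h0 := filter_shift (pvP F) F.length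
      rw [ih] at h0
      simp only [pvP_zero, if_pos] at h0
      simpa using h0.symm
    simp only [List.length_cons]
    rw [filter_shift (pvP (b :: F)) (F.length + 1)]
    rw [filter_shift (fun i => pvP (b :: F) (i + 1)) F.length]
    simp only [pvP_shift, pvP_zero, if_pos, inner]
    rw [pvP_one, pvCutTail, ← inner]
    by_cases h1 : b = true <;> by_cases h2 : F.head?.getD false = true <;>
      simp [h1, h2, List.map_map, Function.comp_def]

-- ---- tokens of shifted cut lists ----
theorem tok_shift (c : Char) (cs : List Char) (a b : Nat) :
    pvTok (c :: cs) (a + 1, b + 1) = pvTok cs (a, b) := by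
  simp [pvTok, Nat.succ_sub_succ]

def pvToks (cs : List Char) (cuts : List Nat) : List String :=
  (cuts.zip cuts.tail).map (pvTok cs)

theorem toks_shift (c : Char) (cs : List Char) (L : List Nat) :
    pvToks (c :: cs) (L.map (· + 1)) = pvToks cs L := by
  unfold pvToks
  rw [← List.map_tail, List.zip_map, List.map_map]
  apply List.map_congr_left
  intro p _
  obtain ⟨a, b⟩ := p
  exact tok_shift c cs a b

theorem runs_head (d : Char) (ds : List Char) :
    ∃ g rest, pvRuns (d :: ds) = (pvIsLet d, g) :: rest := by
  cases hrs : pvRuns ds with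
  | nil => exact ⟨[d], [], by simp [pvRuns, hrs]⟩
  | cons p rest =>
    obtain ⟨k, g⟩ := p
    by_cases h : pvIsLet d = k
    · exact ⟨d :: g, rest, by simp [pvRuns, hrs, h]⟩
    · exact ⟨[d], (k, g) :: rest, by simp [pvRuns, hrs, h]⟩

theorem ofList_inj (l1 l2 : List Char) (h : String.ofList l1 = String.ofList l2) : l1 = l2 := by
  have := congrArg String.toList h
  simpa using this

theorem toks_eq_dispatch (cs : List Char) :
    pvToks cs (0 :: pvCutTail (cs.map pvIsLet)) = pvDispatch (pvRuns cs) := by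
  induction cs with
  | nil => decide
  | cons c cs ih =>
    by_cases h : (pvIsLet c && (List.map pvIsLet cs).headD false) = true
    · -- c is a letter and cs starts with a letter: the first token extends
      have hc : pvIsLet c = true := ((Bool.and_eq_true _ _).mp h).1
      have hd0 : (List.map pvIsLet cs).headD false = true := ((Bool.and_eq_true _ _).mp h).2
      obtain ⟨d, cs', rfl⟩ : ∃ d cs', cs = d :: cs' := by
        cases cs with
        | nil => simp at hd0
        | cons d cs' => exact ⟨d, cs', rfl⟩
      have hdl : pvIsLet d = true := by simpa using hd0
      have hne := pvCutTail_ne_nil (List.map pvIsLet (d :: cs')) (by simp)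
      obtain ⟨t, T, hT⟩ : ∃ t T, pvCutTail (List.map pvIsLet (d :: cs')) = t :: T := by
        cases hx : pvCutTail (List.map pvIsLet (d :: cs')) with
        | nil => exact absurd hx hne
        | cons t T => exact ⟨t, T, rfl⟩
      obtain ⟨g, rest, hg⟩ := runs_head d cs'
      rw [hdl] at hg
      have hruns : pvRuns (c :: d :: cs') = (true, c :: g) :: rest := by
        rw [pvRuns, hg]; simp [hc]
      rw [hT] at ih
      rw [hg] at ih
      have ih' : pvTok (d :: cs') (0, t) :: pvToks (d :: cs') (t :: T)
          = String.ofList (PySem.Chars.lower g) :: pvDispatch rest := by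
        simpa [pvToks, pvDispatch] using ih
      have hhd : pvTok (d :: cs') (0, t) = String.ofList (PySem.Chars.lower g) := by
        have := congrArg List.head? ih'
        simpa using this
      have htl : pvToks (d :: cs') (t :: T) = pvDispatch rest := by
        have := congrArg List.tail ih'
        simpa using this
      have hhd' : PySem.Chars.lower (List.take t (d :: cs')) = PySem.Chars.lower g := by
        apply ofList_inj
        rw [← hhd]
        simp [pvTok, hdl]
      rw [List.map_cons, pvCutTail, hT, if_pos h]
      simp only [List.nil_append, List.map_cons]
      have hsplit : pvToks (c :: d :: cs') (0 :: (t + 1) :: List.map (· + 1) T) =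
          pvTok (c :: d :: cs') (0, t + 1) :: pvToks (c :: d :: cs') (List.map (· + 1) (t :: T)) := by
        simp [pvToks]
      rw [hsplit, toks_shift, htl, hruns]
      have htok : pvTok (c :: d :: cs') (0, t + 1)
          = String.ofList (PySem.Chars.lower (c :: List.take t (d :: cs'))) := by
        simp [pvTok, hc]
      have hext : PySem.Chars.lower (c :: List.take t (d :: cs')) = PySem.Chars.lower (c :: g) := by
        simp only [PySem.Chars.lower, List.map_cons]
        simp only [PySem.Chars.lower] at hhd'
        rw [hhd']
      rw [htok, hext]
      simp [pvDispatch]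
    · -- boundary after the first character: first token is exactly [c]
      rw [List.map_cons, pvCutTail, if_neg h]
      simp only [List.singleton_append]
      have hsplit : pvToks (c :: cs) (0 :: 1 :: List.map (· + 1) (pvCutTail (List.map pvIsLet cs))) =
          pvTok (c :: cs) (0, 1) :: pvToks (c :: cs) (List.map (· + 1) (0 :: pvCutTail (List.map pvIsLet cs))) := by
        simp [pvToks]
      rw [hsplit, toks_shift, ih]
      symm
      cases cs with
      | nil =>
        by_cases hc : pvIsLet c = true <;>
          simp [pvRuns, pvDispatch, pvTok, hc, PySem.Chars.lower]
      | cons d cs' =>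
        obtain ⟨g, rest, hg⟩ := runs_head d cs'
        by_cases hc : pvIsLet c = true
        · have hdl : pvIsLet d = false := by
            cases hdd : pvIsLet d with
            | false => rfl
            | true => exact absurd (by simp [hc, hdd]) h
          rw [hdl] at hg
          rw [pvRuns, hg]
          simp [hc, pvDispatch, pvTok, PySem.Chars.lower]
        · have hc' : pvIsLet c = false := by simpa using hc
          cases hdd : pvIsLet d with
          | false =>
            rw [hdd] at hg
            rw [pvRuns, hg]
            simp [hc', pvDispatch, pvTok]
          | true =>
            rw [hdd] at hg
            rw [pvRuns, hg]
            simp [hc', pvDispatch, pvTok]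

-- ===== VERDICT (by name: the statement is the Claim_ definition above) =====
theorem cut_sentence_by_word_spec : Claim_equal_cut_sentence_by_word := by
  intro s _
  unfold Spec_cut_sentence_by_word
  have hA := cutA_eq_dispatch s.toList []
  simp [pvPrepend] at hA
  have hB : cut_sentence_by_word_alt s =
      pvToks s.toList ((List.range (s.toList.length + 1)).filter (pvP (s.toList.map pvIsLet))) := rfl
  show cutA [] s.toList = cut_sentence_by_word_alt s
  rw [hA, hB]
  rw [show (List.range (s.toList.length + 1)).filter (pvP (s.toList.map pvIsLet)) =
        0 :: pvCutTail (s.toList.map pvIsLet) from by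
      simpa using cuts_eq (s.toList.map pvIsLet)]
  exact (toks_eq_dispatch s.toList).symm
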